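-- pv_equiv track=rewrite | github.com/coghex/synarchy | tools/world_determinism.py | diff_dumps
-- ===== SOURCE A (Python) =====
-- from typing import Any
--
-- def diff_dumps(a: list[dict[str, Any]],
--                b: list[dict[str, Any]]) -> list[tuple[tuple[int, int], dict, dict]]:
--     """Return a list of (coord, tile_a, tile_b) for tiles that differ."""
--     grid_a = {(t["x"], t["y"]): t for t in a}
--     grid_b = {(t["x"], t["y"]): t for t in b}
--
--     diffs = []
--     all_coords = set(grid_a.keys()) | set(grid_b.keys())
--     for coord in sorted(all_coords):
--         ta = grid_a.get(coord)
--         tb = grid_b.get(coord)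
--         if ta != tb:
--             diffs.append((coord, ta, tb))
--     return diffs
-- ===== SOURCE B (Python) =====
-- def diff_dumps(a, b):
--     """Return a list of (coord, tile_a, tile_b) for tiles that differ.
--
--     Two-pointer merge of the two sorted coordinate lists instead of
--     sorting the union set and looking each coord up in both grids.
--     """
--     grid_a = {(t["x"], t["y"]): t for t in a}
--     grid_b = {(t["x"], t["y"]): t for t in b}
--     ka = sorted(grid_a)
--     kb = sorted(grid_b)
--     diffs = []
--     i, j = 0, 0
--     while i < len(ka) and j < len(kb):
--         if ka[i] < kb[j]:
--             diffs.append((ka[i], grid_a[ka[i]], None))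
--             i += 1
--         elif kb[j] < ka[i]:
--             diffs.append((kb[j], None, grid_b[kb[j]]))
--             j += 1
--         else:
--             ta = grid_a[ka[i]]
--             tb = grid_b[kb[j]]
--             if ta != tb:
--                 diffs.append((ka[i], ta, tb))
--             i += 1
--             j += 1
--     while i < len(ka):
--         diffs.append((ka[i], grid_a[ka[i]], None))
--         i += 1
--     while j < len(kb):
--         diffs.append((kb[j], None, grid_b[kb[j]]))
--         j += 1
--     return diffs
-- ===== Notes on version B (the rewrite author's own statement) =====
-- stated objective: faster
-- what changed: Instead of building the set-union of the two key sets, sorting it and looking every coordinate up in both grids, B sorts each grid's key list separately and does a two-pointer merge, emitting one-sided and differing entries directly in merge order.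
import Mathlib
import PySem

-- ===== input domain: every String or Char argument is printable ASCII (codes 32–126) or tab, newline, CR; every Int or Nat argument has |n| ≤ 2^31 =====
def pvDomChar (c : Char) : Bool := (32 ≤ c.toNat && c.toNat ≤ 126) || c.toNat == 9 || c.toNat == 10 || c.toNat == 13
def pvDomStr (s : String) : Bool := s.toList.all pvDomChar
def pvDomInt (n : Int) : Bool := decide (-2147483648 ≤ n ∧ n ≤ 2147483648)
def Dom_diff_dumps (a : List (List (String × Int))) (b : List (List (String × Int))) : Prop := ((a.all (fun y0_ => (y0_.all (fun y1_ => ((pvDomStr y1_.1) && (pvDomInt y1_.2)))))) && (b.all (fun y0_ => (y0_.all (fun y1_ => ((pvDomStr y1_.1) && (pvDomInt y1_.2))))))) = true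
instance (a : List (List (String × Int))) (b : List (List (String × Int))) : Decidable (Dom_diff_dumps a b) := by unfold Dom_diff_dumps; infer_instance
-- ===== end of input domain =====

-- B replaces A's sort-the-union-set-then-look-both-grids-up loop by a two-pointer merge of the
-- two separately sorted key lists (objective: faster by a constant factor — no union set, one
-- merge pass, direct lookups).

-- ===== PORT A =====
-- A tile parameter is a Python dict encoded as an association list; dict(pairs) keeps the first
-- position and the last value of a repeated key, which is exactly PySem.Dict.ofList; pvCanonTile
-- is that dict back as its item list (the identity on lists whose keys are distinct).
def pvCanonTile (t : List (String × Int)) : List (String × Int) := (PySem.Dict.ofList t).items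

-- (t["x"], t["y"]); Pre_diff_dumps guarantees both keys are present (Python raises KeyError
-- otherwise, so the default 0 is never read on admitted inputs)
def pvCoord (t : List (String × Int)) : Int × Int :=
  ((PySem.Dict.ofList t).getD "x" 0, (PySem.Dict.ofList t).getD "y" 0)

-- {(t["x"], t["y"]): t for t in l}
def pvGrid (l : List (List (String × Int))) : PySem.Dict (Int × Int) (List (String × Int)) :=
  l.foldl (fun g t => g.insert (pvCoord t) (pvCanonTile t)) PySem.Dict.empty

-- Python's 'd1 == d2' on dicts: same key set, same value at every key (insertion order ignored)
def pvDictEqB (t1 t2 : List (String × Int)) : Bool :=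
  (t1.map (·.1)).all (fun k => (PySem.Dict.ofList t1).get? k == (PySem.Dict.ofList t2).get? k) &&
  (t2.map (·.1)).all (fun k => (PySem.Dict.ofList t2).get? k == (PySem.Dict.ofList t1).get? k)

-- 'ta == tb' where either side may be None (None equals only None)
def pvOptTileEq (o1 o2 : Option (List (String × Int))) : Bool :=
  match o1, o2 with
  | none, none => true
  | some t1, some t2 => pvDictEqB t1 t2
  | _, _ => false

def diff_dumps (a : List (List (String × Int))) (b : List (List (String × Int))) : List ((Int × Int) × (Option (List (String × Int))) × (Option (List (String × Int)))) :=
  let grid_a := pvGrid a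
  let grid_b := pvGrid b
  let all_coords := PySem.Set.union (PySem.Set.ofList grid_a.keys) (PySem.Set.ofList grid_b.keys)
  (PySem.List.sorted2 all_coords (·.1) (·.2)).foldl
    (fun diffs coord =>
      if !pvOptTileEq (grid_a.get? coord) (grid_b.get? coord) then
        diffs ++ [(coord, grid_a.get? coord, grid_b.get? coord)]
      else diffs) []

-- ===== PORT B =====
-- Python's '<' on two int pairs (lexicographic)
def pvLt (p q : Int × Int) : Bool := decide (p.1 < q.1) || (p.1 == q.1 && decide (p.2 < q.2))

-- the two-pointer merge loop of Source B (including its two trailing drain loops)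
def pvMerge (ga gb : PySem.Dict (Int × Int) (List (String × Int))) :
    List (Int × Int) → List (Int × Int) →
    List ((Int × Int) × (Option (List (String × Int))) × (Option (List (String × Int))))
  | [], [] => []
  | x :: xs, [] => (x, ga.get? x, none) :: pvMerge ga gb xs []
  | [], y :: ys => (y, none, gb.get? y) :: pvMerge ga gb [] ys
  | x :: xs, y :: ys =>
      if pvLt x y then (x, ga.get? x, none) :: pvMerge ga gb xs (y :: ys)
      else if pvLt y x then (y, none, gb.get? y) :: pvMerge ga gb (x :: xs) ys
      else if !pvOptTileEq (ga.get? x) (gb.get? y) then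
        (x, ga.get? x, gb.get? y) :: pvMerge ga gb xs ys
      else pvMerge ga gb xs ys
  termination_by ka kb => ka.length + kb.length

def diff_dumps_alt (a : List (List (String × Int))) (b : List (List (String × Int))) : List ((Int × Int) × (Option (List (String × Int))) × (Option (List (String × Int)))) :=
  let grid_a := pvGrid a
  let grid_b := pvGrid b
  pvMerge grid_a grid_b
    (PySem.List.sorted2 grid_a.keys (·.1) (·.2))
    (PySem.List.sorted2 grid_b.keys (·.1) (·.2))

-- ===== PRECONDITION & SPEC =====
-- Pre_ excludes exactly the inputs containing a tile without an "x" or "y" key, on which the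
-- Python A raises KeyError at t["x"] / t["y"].
def Pre_diff_dumps (a : List (List (String × Int))) (b : List (List (String × Int))) : Prop :=
  ∀ t ∈ a ++ b, "x" ∈ t.map (·.1) ∧ "y" ∈ t.map (·.1)
instance (a : List (List (String × Int))) (b : List (List (String × Int))) : Decidable (Pre_diff_dumps a b) := by unfold Pre_diff_dumps; infer_instance

def pvWitness_diff_dumps : (List (List (String × Int))) × (List (List (String × Int))) :=
  ([[("x", 1), ("y", 2), ("tile", 7)]], [[("x", 1), ("y", 2), ("tile", 8)], [("x", 0), ("y", 5)]])

def Spec_diff_dumps (a : List (List (String × Int))) (b : List (List (String × Int))) (out : List ((Int × Int) × (Option (List (String × Int))) × (Option (List (String × Int))))) : Prop := out = diff_dumps_alt a b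
instance (a : List (List (String × Int))) (b : List (List (String × Int))) (out : List ((Int × Int) × (Option (List (String × Int))) × (Option (List (String × Int))))) : Decidable (Spec_diff_dumps a b out) := by unfold Spec_diff_dumps; infer_instance

-- ===== CLAIM (what is proved, stated in full; the proofs are below) =====
def Claim_equal_diff_dumps : Prop := ∀ (a : List (List (String × Int))) (b : List (List (String × Int))), Dom_diff_dumps a b → Pre_diff_dumps a b → Spec_diff_dumps a b (diff_dumps a b)

-- ===== LEMMAS AND PROOFS =====

-- an integer key that realises the lexicographic order of coordinate pairs inside the domain bound
def pvKeyC (c : Int × Int) : Int := c.1 * 8589934592 + c.2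

def pvBnd (c : Int × Int) : Prop :=
  (-2147483648 ≤ c.1 ∧ c.1 ≤ 2147483648) ∧ (-2147483648 ≤ c.2 ∧ c.2 ≤ 2147483648)

-- key skeleton of pvMerge (proof-side only)
def pvMergeKeys : List (Int × Int) → List (Int × Int) → List (Int × Int)
  | [], kb => kb
  | x :: xs, [] => x :: pvMergeKeys xs []
  | x :: xs, y :: ys =>
      if pvLt x y then x :: pvMergeKeys xs (y :: ys)
      else if pvLt y x then y :: pvMergeKeys (x :: xs) ys
      else x :: pvMergeKeys xs ys
  termination_by ka kb => ka.length + kb.length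

theorem pvLt_eq_keyC (p q : Int × Int) (hp : pvBnd p) (hq : pvBnd q) :
    pvLt p q = decide (pvKeyC p < pvKeyC q) := by
  obtain ⟨⟨h1,h2⟩,h3,h4⟩ := hp; obtain ⟨⟨g1,g2⟩,g3,g4⟩ := hq
  rw [Bool.eq_iff_iff]
  simp only [pvLt, pvKeyC, Bool.or_eq_true, Bool.and_eq_true, decide_eq_true_eq, beq_iff_eq]
  constructor
  · rintro (h | ⟨h, h'⟩) <;> nlinarith
  · intro h
    rcases lt_trichotomy p.1 q.1 with h' | h' | h'
    · exact Or.inl h'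
    · exact Or.inr ⟨h', by nlinarith⟩
    · exfalso; nlinarith

theorem pvKeyC_inj (p q : Int × Int) (hp : pvBnd p) (hq : pvBnd q)
    (h : pvKeyC p = pvKeyC q) : p = q := by
  obtain ⟨⟨h1,h2⟩,h3,h4⟩ := hp; obtain ⟨⟨g1,g2⟩,g3,g4⟩ := hq
  simp only [pvKeyC] at h
  have : p.1 = q.1 := by nlinarith [sq_nonneg (p.1 - q.1)]
  have : p.2 = q.2 := by nlinarith
  exact Prod.ext ‹p.1 = q.1› this

theorem pvInsertBy_congr {α : Type} (f g : α → α → Bool) (x : α) (ys : List α)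
    (h : ∀ y ∈ ys, f x y = g x y) :
    PySem.List.insertBy f x ys = PySem.List.insertBy g x ys := by
  induction ys with
  | nil => rfl
  | cons y ys ih =>
    simp only [PySem.List.insertBy]
    rw [h y (by simp)]
    split
    · rfl
    · rw [ih (fun z hz => h z (by simp [hz]))]

theorem pvFoldl_insertBy_congr (f g : Int × Int → Int × Int → Bool)
    (hagree : ∀ p q, pvBnd p → pvBnd q → f p q = g p q) :
    ∀ (xs acc : List (Int × Int)), (∀ c ∈ xs, pvBnd c) → (∀ c ∈ acc, pvBnd c) →
    xs.foldl (fun acc x => PySem.List.insertBy f x acc) acc =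
      xs.foldl (fun acc x => PySem.List.insertBy g x acc) acc := by
  intro xs
  induction xs with
  | nil => intro acc _ _; rfl
  | cons x xs ih =>
    intro acc hx hacc
    simp only [List.foldl_cons]
    rw [pvInsertBy_congr f g x acc (fun y hy => hagree x y (hx x (by simp)) (hacc y hy)),
        ih _ (fun c hc => hx c (by simp [hc]))
          (fun c hc => by
            rcases (PySem.List.mem_insertBy g x c acc).mp hc with h | h
            · exact h ▸ hx x (by simp)
            · exact hacc c h)]

theorem pvSorted2_eq_sorted (xs : List (Int × Int)) (h : ∀ c ∈ xs, pvBnd c) :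
    PySem.List.sorted2 xs (·.1) (·.2) = PySem.List.sorted xs pvKeyC := by
  rw [PySem.List.sorted_eq_foldl_insertBy]
  show xs.foldl (fun acc x => PySem.List.insertBy
      (fun a b => decide (a.1 < b.1) || (!decide (b.1 < a.1) && decide (a.2 < b.2))) x acc) [] = _
  apply pvFoldl_insertBy_congr _ _ _ _ _ h (by simp)
  intro p q hp hq
  obtain ⟨⟨h1,h2⟩,h3,h4⟩ := hp; obtain ⟨⟨g1,g2⟩,g3,g4⟩ := hq
  rw [Bool.eq_iff_iff]
  simp only [pvKeyC, Bool.or_eq_true, Bool.and_eq_true, Bool.not_eq_true', decide_eq_true_eq, decide_eq_false_iff_not, not_lt]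
  constructor
  · rintro (h | ⟨h, h'⟩) <;> nlinarith
  · intro h
    rcases lt_trichotomy p.1 q.1 with h' | h' | h'
    · exact Or.inl h'
    · exact Or.inr ⟨by omega, by nlinarith⟩
    · exfalso; nlinarith

theorem pvMergeKeys_mem_of (ka kb : List (Int × Int)) (c : Int × Int)
    (h : c ∈ pvMergeKeys ka kb) : c ∈ ka ∨ c ∈ kb := by
  fun_induction pvMergeKeys ka kb <;> simp_all <;> tauto

theorem pvMergeKeys_mem (ka kb : List (Int × Int))
    (hba : ∀ c ∈ ka, pvBnd c) (hbb : ∀ c ∈ kb, pvBnd c) (c : Int × Int) :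
    c ∈ pvMergeKeys ka kb ↔ c ∈ ka ∨ c ∈ kb := by
  fun_induction pvMergeKeys ka kb with
  | case1 kb => simp
  | case2 x xs ih => simp_all
  | case3 x xs y ys hlt ih =>
    rw [List.mem_cons, ih (fun c hc => hba c (by simp [hc])) hbb]
    simp_all; tauto
  | case4 x xs y ys hlt hlt' ih =>
    rw [List.mem_cons, ih hba (fun c hc => hbb c (by simp [hc]))]
    simp_all; tauto
  | case5 x xs y ys hlt hlt' ih =>
    have hxy : x = y := by
      apply pvKeyC_inj x y (hba x (by simp)) (hbb y (by simp))
      rw [pvLt_eq_keyC x y (hba x (by simp)) (hbb y (by simp))] at hlt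
      rw [pvLt_eq_keyC y x (hbb y (by simp)) (hba x (by simp))] at hlt'
      simp at hlt hlt'; omega
    rw [List.mem_cons, ih (fun c hc => hba c (by simp [hc])) (fun c hc => hbb c (by simp [hc]))]
    subst hxy; simp; tauto

theorem pvMergeKeys_pairwise (ka kb : List (Int × Int))
    (hba : ∀ c ∈ ka, pvBnd c) (hbb : ∀ c ∈ kb, pvBnd c)
    (ha : ka.Pairwise (fun p q => pvKeyC p < pvKeyC q))
    (hb : kb.Pairwise (fun p q => pvKeyC p < pvKeyC q)) :
    (pvMergeKeys ka kb).Pairwise (fun p q => pvKeyC p < pvKeyC q) := by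
  fun_induction pvMergeKeys ka kb with
  | case1 kb => exact hb
  | case2 x xs ih =>
    rw [List.pairwise_cons] at ha ⊢
    refine ⟨fun c hc => ha.1 c ?_, ih (fun c hc => hba c (by simp [hc])) hbb ha.2 hb⟩
    · rcases pvMergeKeys_mem_of xs [] c hc with h | h
      · exact h
      · simp at h
  | case3 x xs y ys hlt ih =>
    have hxy : pvKeyC x < pvKeyC y := by
      have := pvLt_eq_keyC x y (hba x (by simp)) (hbb y (by simp))
      rw [this] at hlt; simpa using hlt
    rw [List.pairwise_cons] at ha ⊢
    refine ⟨fun c hc => ?_, ih (fun c hc => hba c (by simp [hc])) hbb ha.2 hb⟩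
    rcases pvMergeKeys_mem_of _ _ c hc with h | h
    · exact ha.1 c h
    · rcases List.mem_cons.mp h with h | h
      · exact h ▸ hxy
      · exact lt_trans hxy ((List.pairwise_cons.mp hb).1 c h)
  | case4 x xs y ys hlt hlt' ih =>
    have hyx : pvKeyC y < pvKeyC x := by
      have := pvLt_eq_keyC y x (hbb y (by simp)) (hba x (by simp))
      rw [this] at hlt'; simpa using hlt'
    rw [List.pairwise_cons] at hb ⊢
    refine ⟨fun c hc => ?_, ih hba (fun c hc => hbb c (by simp [hc])) ha hb.2⟩
    rcases pvMergeKeys_mem_of _ _ c hc with h | h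
    · rcases List.mem_cons.mp h with h | h
      · exact h ▸ hyx
      · exact lt_trans hyx ((List.pairwise_cons.mp ha).1 c h)
    · exact hb.1 c h
  | case5 x xs y ys hlt hlt' ih =>
    have hxy : x = y := by
      apply pvKeyC_inj x y (hba x (by simp)) (hbb y (by simp))
      rw [pvLt_eq_keyC x y (hba x (by simp)) (hbb y (by simp))] at hlt
      rw [pvLt_eq_keyC y x (hbb y (by simp)) (hba x (by simp))] at hlt'
      simp at hlt hlt'; omega
    rw [List.pairwise_cons] at ha ⊢
    rw [List.pairwise_cons] at hb
    refine ⟨fun c hc => ?_, ih (fun c hc => hba c (by simp [hc])) (fun c hc => hbb c (by simp [hc])) ha.2 hb.2⟩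
    rcases pvMergeKeys_mem_of _ _ c hc with h | h
    · exact ha.1 c h
    · exact hxy ▸ hb.1 c h

theorem pvMerge_eq (ga gb : PySem.Dict (Int × Int) (List (String × Int)))
    (ka kb : List (Int × Int))
    (hba : ∀ c ∈ ka, pvBnd c) (hbb : ∀ c ∈ kb, pvBnd c)
    (ha : ka.Pairwise (fun p q => pvKeyC p < pvKeyC q))
    (hb : kb.Pairwise (fun p q => pvKeyC p < pvKeyC q))
    (hga : ∀ c ∈ ka, (ga.get? c).isSome)
    (hgb : ∀ c ∈ kb, (gb.get? c).isSome)
    (hgao : ∀ c ∈ kb, c ∉ ka → ga.get? c = none)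
    (hgbo : ∀ c ∈ ka, c ∉ kb → gb.get? c = none) :
    pvMerge ga gb ka kb =
      ((pvMergeKeys ka kb).filter
        (fun c => !pvOptTileEq (ga.get? c) (gb.get? c))).map
        (fun c => (c, ga.get? c, gb.get? c)) := by
  fun_induction pvMerge ga gb ka kb with
  | case1 => simp [pvMergeKeys]
  | case2 x xs ih =>
    have hgbx : gb.get? x = none := hgbo x (by simp) (by simp)
    have hsome : (ga.get? x).isSome := hga x (by simp)
    obtain ⟨t, ht⟩ := Option.isSome_iff_exists.mp hsome
    rw [show pvMergeKeys (x :: xs) [] = x :: pvMergeKeys xs [] by rw [pvMergeKeys]]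
    rw [List.filter_cons_of_pos (by simp [ht, hgbx, pvOptTileEq]), List.map_cons, hgbx]
    rw [ih (fun c hc => hba c (by simp [hc])) hbb (List.pairwise_cons.mp ha).2 hb
        (fun c hc => hga c (by simp [hc])) hgb (by simp)
        (fun c hc _ => hgbo c (by simp [hc]) (by simp))]
  | case3 y ys ih =>
    have hgay : ga.get? y = none := hgao y (by simp) (by simp)
    have hsome : (gb.get? y).isSome := hgb y (by simp)
    obtain ⟨t, ht⟩ := Option.isSome_iff_exists.mp hsome
    rw [show pvMergeKeys [] (y :: ys) = y :: ys by rw [pvMergeKeys],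
        show (y : Int × Int) :: ys = y :: pvMergeKeys [] ys by rw [pvMergeKeys]]
    rw [List.filter_cons_of_pos (by simp [ht, hgay, pvOptTileEq]), List.map_cons, hgay]
    rw [ih hba (fun c hc => hbb c (by simp [hc])) ha (List.pairwise_cons.mp hb).2 hga
        (fun c hc => hgb c (by simp [hc])) (fun c hc _ => hgao c (by simp [hc]) (by simp))
        (by simp)]
  | case4 x xs y ys hlt ih =>
    have hxy : pvKeyC x < pvKeyC y := by
      rw [pvLt_eq_keyC x y (hba x (by simp)) (hbb y (by simp))] at hlt; simpa using hlt
    have hxkb : ∀ c ∈ y :: ys, pvKeyC x < pvKeyC c := by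
      intro c hc
      rcases List.mem_cons.mp hc with h | h
      · exact h ▸ hxy
      · exact lt_trans hxy ((List.pairwise_cons.mp hb).1 c h)
    have hxnot : x ∉ y :: ys := fun h => absurd (hxkb x h) (lt_irrefl _)
    have hgbx : gb.get? x = none := hgbo x (by simp) hxnot
    have hsome : (ga.get? x).isSome := hga x (by simp)
    obtain ⟨t, ht⟩ := Option.isSome_iff_exists.mp hsome
    rw [show pvMergeKeys (x :: xs) (y :: ys) = x :: pvMergeKeys xs (y :: ys) by
          rw [pvMergeKeys]; simp [hlt]]
    rw [List.filter_cons_of_pos (by simp [ht, hgbx, pvOptTileEq]), List.map_cons, hgbx]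
    rw [ih (fun c hc => hba c (by simp [hc])) hbb (List.pairwise_cons.mp ha).2 hb
        (fun c hc => hga c (by simp [hc])) hgb
        (fun c hc hnc => hgao c hc (by
          intro hmem; rcases List.mem_cons.mp hmem with h | h
          · exact absurd (h ▸ hxkb c hc) (lt_irrefl _)
          · exact hnc h))
        (fun c hc => hgbo c (by simp [hc]))]
  | case5 x xs y ys hlt hlt' ih =>
    have hyx : pvKeyC y < pvKeyC x := by
      rw [pvLt_eq_keyC y x (hbb y (by simp)) (hba x (by simp))] at hlt'; simpa using hlt'
    have hyka : ∀ c ∈ x :: xs, pvKeyC y < pvKeyC c := by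
      intro c hc
      rcases List.mem_cons.mp hc with h | h
      · exact h ▸ hyx
      · exact lt_trans hyx ((List.pairwise_cons.mp ha).1 c h)
    have hynot : y ∉ x :: xs := fun h => absurd (hyka y h) (lt_irrefl _)
    have hgay : ga.get? y = none := hgao y (by simp) hynot
    have hsome : (gb.get? y).isSome := hgb y (by simp)
    obtain ⟨t, ht⟩ := Option.isSome_iff_exists.mp hsome
    rw [show pvMergeKeys (x :: xs) (y :: ys) = y :: pvMergeKeys (x :: xs) ys by
          rw [pvMergeKeys]; simp [hlt, hlt']]
    rw [List.filter_cons_of_pos (by simp [ht, hgay, pvOptTileEq]), List.map_cons, hgay]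
    rw [ih hba (fun c hc => hbb c (by simp [hc])) ha (List.pairwise_cons.mp hb).2
        hga (fun c hc => hgb c (by simp [hc]))
        (fun c hc => hgao c (by simp [hc]))
        (fun c hc hnc => hgbo c hc (by
          intro hmem; rcases List.mem_cons.mp hmem with h | h
          · exact absurd (h ▸ hyka c hc) (lt_irrefl _)
          · exact hnc h))]
  | case6 x xs y ys hlt hlt' hne ih =>
    have hxy : x = y := by
      apply pvKeyC_inj x y (hba x (by simp)) (hbb y (by simp))
      rw [pvLt_eq_keyC x y (hba x (by simp)) (hbb y (by simp))] at hlt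
      rw [pvLt_eq_keyC y x (hbb y (by simp)) (hba x (by simp))] at hlt'
      simp at hlt hlt'; omega
    subst hxy
    have hxxs : ∀ c ∈ xs, pvKeyC x < pvKeyC c := fun c hc => (List.pairwise_cons.mp ha).1 c hc
    have hxys : ∀ c ∈ ys, pvKeyC x < pvKeyC c := fun c hc => (List.pairwise_cons.mp hb).1 c hc
    rw [show pvMergeKeys (x :: xs) (x :: ys) = x :: pvMergeKeys xs ys by
          rw [pvMergeKeys]; simp [hlt]]
    rw [List.filter_cons_of_pos (by simpa using hne), List.map_cons]
    rw [ih (fun c hc => hba c (by simp [hc])) (fun c hc => hbb c (by simp [hc]))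
        (List.pairwise_cons.mp ha).2 (List.pairwise_cons.mp hb).2
        (fun c hc => hga c (by simp [hc])) (fun c hc => hgb c (by simp [hc]))
        (fun c hc hnc => hgao c (by simp [hc]) (by
          intro hmem; rcases List.mem_cons.mp hmem with h | h
          · exact absurd (h ▸ hxys c hc) (lt_irrefl _)
          · exact hnc h))
        (fun c hc hnc => hgbo c (by simp [hc]) (by
          intro hmem; rcases List.mem_cons.mp hmem with h | h
          · exact absurd (h ▸ hxxs c hc) (lt_irrefl _)
          · exact hnc h))]
  | case7 x xs y ys hlt hlt' hne ih =>
    have hxy : x = y := by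
      apply pvKeyC_inj x y (hba x (by simp)) (hbb y (by simp))
      rw [pvLt_eq_keyC x y (hba x (by simp)) (hbb y (by simp))] at hlt
      rw [pvLt_eq_keyC y x (hbb y (by simp)) (hba x (by simp))] at hlt'
      simp at hlt hlt'; omega
    subst hxy
    have hxxs : ∀ c ∈ xs, pvKeyC x < pvKeyC c := fun c hc => (List.pairwise_cons.mp ha).1 c hc
    have hxys : ∀ c ∈ ys, pvKeyC x < pvKeyC c := fun c hc => (List.pairwise_cons.mp hb).1 c hc
    rw [show pvMergeKeys (x :: xs) (x :: ys) = x :: pvMergeKeys xs ys by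
          rw [pvMergeKeys]; simp [hlt]]
    rw [List.filter_cons_of_neg (by simpa using hne)]
    rw [ih (fun c hc => hba c (by simp [hc])) (fun c hc => hbb c (by simp [hc]))
        (List.pairwise_cons.mp ha).2 (List.pairwise_cons.mp hb).2
        (fun c hc => hga c (by simp [hc])) (fun c hc => hgb c (by simp [hc]))
        (fun c hc hnc => hgao c (by simp [hc]) (by
          intro hmem; rcases List.mem_cons.mp hmem with h | h
          · exact absurd (h ▸ hxys c hc) (lt_irrefl _)
          · exact hnc h))
        (fun c hc hnc => hgbo c (by simp [hc]) (by
          intro hmem; rcases List.mem_cons.mp hmem with h | h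
          · exact absurd (h ▸ hxxs c hc) (lt_irrefl _)
          · exact hnc h))]

theorem pvGrid_keys (l : List (List (String × Int))) :
    (pvGrid l).keys = PySem.Set.ofList (l.map pvCoord) := by
  unfold pvGrid
  rw [PySem.Dict.keys_foldl_insert_key l pvCoord (fun _ t => pvCanonTile t) PySem.Dict.empty]
  rw [PySem.Dict.keys_empty, PySem.Set.update_nil_left]

theorem pvGrid_nodup (l : List (List (String × Int))) : (pvGrid l).keys.Nodup := by
  unfold pvGrid
  exact PySem.Dict.nodup_keys_foldl_insert_key l pvCoord (fun _ t => pvCanonTile t)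
    PySem.Dict.empty (by simp [PySem.Dict.keys_empty])

theorem pvFoldlInsert_get? (l : List (String × Int)) :
    ∀ (d : PySem.Dict String Int) (k : String) (v : Int),
    ((l.foldl (fun acc p => acc.insert p.1 p.2) d).get? k = some v) →
    v ∈ l.map (·.2) ∨ d.get? k = some v := by
  induction l with
  | nil => intro d k v h; exact Or.inr h
  | cons p l ih =>
    intro d k v h
    rcases ih _ k v h with h' | h'
    · exact Or.inl (by simp at h' ⊢; tauto)
    · rw [PySem.Dict.get?_insert] at h'
      split at h'
      · simp at h'; exact Or.inl (by simp; exact Or.inl h'.symm)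
      · exact Or.inr h'

theorem pvCoord_bnd (t : List (String × Int)) (h : ∀ v ∈ t.map (·.2), pvDomInt v = true) :
    pvBnd (pvCoord t) := by
  have hx : ∀ (k : String), (PySem.Dict.ofList t).getD k 0 = 0 ∨
      (PySem.Dict.ofList t).getD k 0 ∈ t.map (·.2) := by
    intro k
    rcases hh : (PySem.Dict.ofList t).get? k with _ | v
    · left; rw [PySem.Dict.getD_eq_get?_getD, hh]; rfl
    · right
      rw [PySem.Dict.getD_eq_get?_getD, hh]
      have := pvFoldlInsert_get? t PySem.Dict.empty k v ?_
      · rcases this with h' | h'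
        · exact h'
        · rw [PySem.Dict.get?_empty] at h'; cases h'
      · exact hh
  constructor
  · rcases hx "x" with h' | h'
    · simp [pvCoord, h']
    · have := h _ h'; simp [pvDomInt] at this; simpa [pvCoord] using this
  · rcases hx "y" with h' | h'
    · simp [pvCoord, h']
    · have := h _ h'; simp [pvDomInt] at this; simpa [pvCoord] using this

theorem pvStrict_of_le (xs : List (Int × Int)) (hb : ∀ c ∈ xs, pvBnd c)
    (hle : xs.Pairwise (fun p q => pvKeyC p ≤ pvKeyC q)) (hnd : xs.Nodup) :
    xs.Pairwise (fun p q => pvKeyC p < pvKeyC q) := by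
  have hand := hle.and hnd
  refine List.Pairwise.imp_of_mem ?_ hand
  intro p q hp hq h
  rcases lt_or_eq_of_le h.1 with h' | h'
  · exact h'
  · exact absurd (pvKeyC_inj p q (hb p hp) (hb q hq) h') h.2

-- ===== VERDICT (by name: the statement is the Claim_ definition above) =====
theorem diff_dumps_spec : Claim_equal_diff_dumps := by
  intro a b hdom hpre
  unfold Spec_diff_dumps
  have hdoma : ∀ t ∈ a, ∀ v ∈ t.map (·.2), pvDomInt v = true := by
    unfold Dom_diff_dumps at hdom
    simp only [Bool.and_eq_true, List.all_eq_true] at hdom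
    intro t ht v hv
    simp only [List.mem_map] at hv
    obtain ⟨p, hp, rfl⟩ := hv
    exact (hdom.1 t ht p hp).2
  have hdomb : ∀ t ∈ b, ∀ v ∈ t.map (·.2), pvDomInt v = true := by
    unfold Dom_diff_dumps at hdom
    simp only [Bool.and_eq_true, List.all_eq_true] at hdom
    intro t ht v hv
    simp only [List.mem_map] at hv
    obtain ⟨p, hp, rfl⟩ := hv
    exact (hdom.2 t ht p hp).2
  -- bounds of the two key lists
  have hbk : ∀ (l : List (List (String × Int))),
      (∀ t ∈ l, ∀ v ∈ t.map (·.2), pvDomInt v = true) →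
      ∀ c ∈ (pvGrid l).keys, pvBnd c := by
    intro l hl c hc
    rw [pvGrid_keys, PySem.Set.mem_ofList, List.mem_map] at hc
    obtain ⟨t, ht, rfl⟩ := hc
    exact pvCoord_bnd t (hl t ht)
  have hbka := hbk a hdoma
  have hbkb := hbk b hdomb
  set ga := pvGrid a with hga_def
  set gb := pvGrid b with hgb_def
  -- the two sorted key lists
  have hsa := pvSorted2_eq_sorted ga.keys hbka
  have hsb := pvSorted2_eq_sorted gb.keys hbkb
  set ka := PySem.List.sorted2 ga.keys (·.1) (·.2) with hka_def
  set kb := PySem.List.sorted2 gb.keys (·.1) (·.2) with hkb_def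
  have hmemka : ∀ c, c ∈ ka ↔ c ∈ ga.keys := fun c =>
    (PySem.List.sorted2_perm ga.keys (·.1) (·.2) false).mem_iff
  have hmemkb : ∀ c, c ∈ kb ↔ c ∈ gb.keys := fun c =>
    (PySem.List.sorted2_perm gb.keys (·.1) (·.2) false).mem_iff
  have hbka' : ∀ c ∈ ka, pvBnd c := fun c hc => hbka c ((hmemka c).mp hc)
  have hbkb' : ∀ c ∈ kb, pvBnd c := fun c hc => hbkb c ((hmemkb c).mp hc)
  have hpka : ka.Pairwise (fun p q => pvKeyC p < pvKeyC q) := by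
    rw [hsa]
    exact pvStrict_of_le _
      (fun c hc => hbka c ((PySem.List.sorted_perm ga.keys pvKeyC false).mem_iff.mp hc))
      (PySem.List.sorted_pairwise ga.keys pvKeyC)
      ((PySem.List.sorted_perm ga.keys pvKeyC false).nodup_iff.mpr (pvGrid_nodup a))
  have hpkb : kb.Pairwise (fun p q => pvKeyC p < pvKeyC q) := by
    rw [hsb]
    exact pvStrict_of_le _
      (fun c hc => hbkb c ((PySem.List.sorted_perm gb.keys pvKeyC false).mem_iff.mp hc))
      (PySem.List.sorted_pairwise gb.keys pvKeyC)
      ((PySem.List.sorted_perm gb.keys pvKeyC false).nodup_iff.mpr (pvGrid_nodup b))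
  -- the union of coordinates
  set U : List (Int × Int) :=
    PySem.Set.union (PySem.Set.ofList ga.keys) (PySem.Set.ofList gb.keys) with hU_def
  have hmemU : ∀ c, c ∈ U ↔ c ∈ ga.keys ∨ c ∈ gb.keys := by
    intro c
    rw [hU_def, PySem.Set.mem_union, PySem.Set.mem_ofList, PySem.Set.mem_ofList]
  have hbU : ∀ c ∈ U, pvBnd c := by
    intro c hc
    rcases (hmemU c).mp hc with h | h
    · exact hbka c h
    · exact hbkb c h
  have hndU : U.Nodup := PySem.Set.nodup_union _ _ (PySem.Set.nodup_ofList ga.keys)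
  -- sorted2 of the union is exactly the merged key skeleton
  have hmergeK : PySem.List.sorted2 U (·.1) (·.2) = pvMergeKeys ka kb := by
    rw [pvSorted2_eq_sorted U hbU]
    apply PySem.List.sorted_eq_of_perm_of_pairwise_lt
    · rw [List.perm_ext_iff_of_nodup ?_ hndU]
      · intro c
        rw [pvMergeKeys_mem ka kb hbka' hbkb' c, hmemU c, hmemka c, hmemkb c]
      · exact (pvMergeKeys_pairwise ka kb hbka' hbkb' hpka hpkb).imp
          (fun h => fun heq => absurd (heq ▸ h) (lt_irrefl _))
    · exact pvMergeKeys_pairwise ka kb hbka' hbkb' hpka hpkb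
  -- both sides as filter-map over the merged keys
  show (PySem.List.sorted2 U (fun x => x.1) (fun x => x.2)).foldl
      (fun diffs coord =>
        if (!pvOptTileEq (ga.get? coord) (gb.get? coord)) = true then
          diffs ++ [(coord, ga.get? coord, gb.get? coord)]
        else diffs) [] = pvMerge ga gb ka kb
  rw [hmergeK]
  rw [PySem.List.foldl_append_if
        (fun c => !pvOptTileEq (ga.get? c) (gb.get? c))
        (fun c => (c, ga.get? c, gb.get? c))]
  rw [List.nil_append]
  rw [pvMerge_eq ga gb ka kb hbka' hbkb' hpka hpkb
        (fun c hc => by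
          rw [← PySem.Dict.contains_eq_isSome_get?]
          exact (PySem.Dict.contains_iff_mem_keys ga c).mpr ((hmemka c).mp hc))
        (fun c hc => by
          rw [← PySem.Dict.contains_eq_isSome_get?]
          exact (PySem.Dict.contains_iff_mem_keys gb c).mpr ((hmemkb c).mp hc))
        (fun c _ hnc => (PySem.Dict.get?_eq_none_iff_not_mem_keys ga c).mpr
          (fun h => hnc ((hmemka c).mpr h)))
        (fun c _ hnc => (PySem.Dict.get?_eq_none_iff_not_mem_keys gb c).mpr
          (fun h => hnc ((hmemkb c).mpr h)))]
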